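-- pv_equiv track=rewrite | github.com/jjunsheng/learningpython2 | momentoftruth2(prototype).py | findSmallest4
-- ===== SOURCE A (Python) =====
-- def findSmallest4(L):
--     onelist = []
--     for n in range(len(L)):
--         count = 0
--         for x in range(len(L)):
--             if L[n] < L[x]:
--                 count += 1
--         if count > 4:
--             onelist.append(L[n])
--     one_tuple = tuple(onelist)
--     return one_tuple
-- ===== SOURCE B (Python) =====
-- def findSmallest4(L):
--     S = sorted(L)
--     n = len(S)
--     g = {}
--     for i, v in enumerate(S):
--         g[v] = n - 1 - i
--     return tuple(x for x in L if g[x] > 4)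
-- ===== Notes on version B (the rewrite author's own statement) =====
-- stated objective: faster
-- what changed: Replaces the nested index loops (for each element, scan the whole list counting greater elements) by a single sort followed by one pass over the sorted list that records, per value, the count of strictly greater elements (n-1-last index), then one filtering pass over L.
import Mathlib
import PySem

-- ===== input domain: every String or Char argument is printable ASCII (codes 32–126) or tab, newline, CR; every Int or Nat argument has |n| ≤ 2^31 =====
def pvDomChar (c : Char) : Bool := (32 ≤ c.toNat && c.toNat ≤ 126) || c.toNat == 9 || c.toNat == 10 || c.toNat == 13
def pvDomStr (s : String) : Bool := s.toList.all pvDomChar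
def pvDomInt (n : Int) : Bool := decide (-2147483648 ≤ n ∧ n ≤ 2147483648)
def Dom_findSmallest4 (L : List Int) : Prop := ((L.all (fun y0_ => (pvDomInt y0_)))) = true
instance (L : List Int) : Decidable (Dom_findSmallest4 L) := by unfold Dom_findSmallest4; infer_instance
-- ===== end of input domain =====

-- B replaces A's quadratic nested index loops by sort-once plus a single pass that records,
-- for each value, how many elements are strictly greater; same return value (as a list of ints).

-- ===== PORT A =====
def findSmallest4 (L : List Int) : List Int :=
  (PySem.List.pyRange 0 (L.length : Int) 1).foldl (fun onelist n =>
    let count : Int :=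
      (PySem.List.pyRange 0 (L.length : Int) 1).foldl (fun count x =>
        if PySem.List.pyGetD L n 0 < PySem.List.pyGetD L x 0 then count + 1 else count) 0
    if count > 4 then onelist ++ [PySem.List.pyGetD L n 0] else onelist) []

-- ===== PORT B =====
def findSmallest4_alt (L : List Int) : List Int :=
  let S := PySem.List.sorted L (fun x => x) false
  let n : Int := (S.length : Int)
  let g : PySem.Dict Int Int :=
    (PySem.List.enumerate S).foldl (fun d p => d.insert p.2 (n - 1 - p.1)) PySem.Dict.empty
  -- g[x]: the key is always present (x ∈ L and S is a permutation of L), so getD is exact here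
  L.filter (fun x => decide ((4 : Int) < g.getD x 0))

-- ===== PRECONDITION & SPEC =====
def Spec_findSmallest4 (L : List Int) (out : List Int) : Prop := out = findSmallest4_alt L
instance (L : List Int) (out : List Int) : Decidable (Spec_findSmallest4 L out) := by unfold Spec_findSmallest4; infer_instance

-- ===== CLAIM (what is proved, stated in full; the proofs are below) =====
def Claim_equal_findSmallest4 : Prop := ∀ (L : List Int), Dom_findSmallest4 L → Spec_findSmallest4 L (findSmallest4 L)

-- ===== LEMMAS AND PROOFS =====

-- offset of the LAST occurrence of v in S (meaningful when v ∈ S)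
def lastOff (S : List Int) (v : Int) : Nat :=
  match S with
  | [] => 0
  | _ :: xs => if v ∈ xs then 1 + lastOff xs v else 0

-- B's dict-building loop: the surviving entry for v comes from v's last occurrence
lemma get?_fold_insert (S : List Int) (f : Int → Int) (v : Int) :
    ∀ (d : PySem.Dict Int Int) (s : Int),
    ((PySem.List.enumerate S s).foldl (fun d p => d.insert p.2 (f p.1)) d).get? v
      = if v ∈ S then some (f (s + (lastOff S v : Int))) else d.get? v := by
  induction S with
  | nil => intro d s; simp [PySem.List.enumerate_nil]
  | cons x xs ih =>
    intro d s
    rw [PySem.List.enumerate_cons]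
    simp only [List.foldl_cons]
    rw [ih (d.insert x (f s)) (s + 1)]
    by_cases hx : v ∈ xs
    · simp only [hx, if_true, List.mem_cons, or_true, lastOff]
      congr 2
      push_cast
      ring
    · simp only [hx, if_false]
      rw [PySem.Dict.get?_insert]
      by_cases hvx : v = x
      · subst hvx
        simp [lastOff, hx]
      · simp [List.mem_cons, hvx, hx]

-- on a sorted list, "elements after the last occurrence of v" = "elements greater than v"
lemma lastOff_countP (S : List Int) (v : Int) :
    S.Pairwise (· ≤ ·) → v ∈ S →
    ((S.length : Int) - 1 - (lastOff S v : Int)) = (S.countP (fun y => decide (v < y)) : Int) := by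
  induction S with
  | nil => intro _ h; cases h
  | cons x xs ih =>
    intro hs hv
    rw [List.pairwise_cons] at hs
    by_cases hx : v ∈ xs
    · have hxle : x ≤ v := hs.1 v hx
      have := ih hs.2 hx
      simp only [lastOff, hx, if_true, List.countP_cons, List.length_cons]
      have : ¬ (v < x) := not_lt.mpr hxle
      simp only [this, decide_false]
      push_cast
      have := ih hs.2 hx
      omega
    · have hvx : v = x := by
        rcases List.mem_cons.mp hv with h | h
        · exact h
        · exact absurd h hx
      subst hvx
      have hall : ∀ y ∈ xs, decide (v < y) = true := by
        intro y hy
        have hle := hs.1 y hy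
        have hne : y ≠ v := fun h => hx (h ▸ hy)
        simp [lt_of_le_of_ne hle (Ne.symm hne)]
      have hcount : xs.countP (fun y => decide (v < y)) = xs.length :=
        List.countP_eq_length.mpr hall
      simp only [lastOff, hx, if_false, List.countP_cons, List.length_cons, hcount]
      simp only [lt_self_iff_false, decide_false]
      push_cast
      omega

-- A computes, in order, the elements with more than 4 strictly greater elements
lemma findSmallest4_eq_filter (L : List Int) :
    findSmallest4 L
      = L.filter (fun v => decide ((4 : Int) < (L.countP (fun y => decide (v < y)) : Int))) := by
  unfold findSmallest4
  rw [PySem.List.foldl_pyRange_zero_pyGetD' L 0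
      (f := fun onelist v =>
        if ((PySem.List.pyRange 0 (L.length : Int) 1).foldl (fun count x =>
              if v < PySem.List.pyGetD L x 0 then count + 1 else count) (0 : Int)) > 4
        then onelist ++ [v] else onelist) []]
  have hcnt : ∀ v : Int,
      ((PySem.List.pyRange 0 (L.length : Int) 1).foldl (fun count x =>
        if v < PySem.List.pyGetD L x 0 then count + 1 else count) (0 : Int))
      = (L.countP (fun y => decide (v < y)) : Int) := by
    intro v
    rw [PySem.List.foldl_pyRange_zero_pyGetD' L 0
        (f := fun count y => if v < y then count + 1 else count) (0 : Int)]
    rw [PySem.List.foldl_ite_add_one]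
    ring
  simp only [hcnt, gt_iff_lt]
  rw [PySem.List.foldl_append_ite_eq_filter]
  simp

-- B computes the same filter
lemma findSmallest4_alt_eq_filter (L : List Int) :
    findSmallest4_alt L
      = L.filter (fun v => decide ((4 : Int) < (L.countP (fun y => decide (v < y)) : Int))) := by
  unfold findSmallest4_alt
  simp only []
  apply List.filter_congr
  intro x hx
  have hxS : x ∈ PySem.List.sorted L (fun x => x) false := (PySem.List.mem_sorted _ _ _ _).mpr hx
  have hlook := get?_fold_insert (PySem.List.sorted L (fun x => x) false)
      (fun i => ((PySem.List.sorted L (fun x => x) false).length : Int) - 1 - i) x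
      PySem.Dict.empty 0
  rw [if_pos hxS] at hlook
  rw [PySem.Dict.getD_eq_get?_getD, hlook]
  have hpair : (PySem.List.sorted L (fun x => x) false).Pairwise (· ≤ ·) := by
    have := PySem.List.sorted_pairwise (xs := L) (key := fun x => x)
    simpa using this
  have hcnt := lastOff_countP (PySem.List.sorted L (fun x => x) false) x hpair hxS
  have hperm : (PySem.List.sorted L (fun x => x) false).Perm L := PySem.List.sorted_perm L _ _
  rw [hperm.countP_eq] at hcnt
  simp only [Option.getD_some, zero_add]
  rw [show ((PySem.List.sorted L (fun x => x) false).length : Int) - 1 -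
        (lastOff (PySem.List.sorted L (fun x => x) false) x : Int)
      = (L.countP (fun y => decide (x < y)) : Int) from hcnt]

-- ===== VERDICT (by name: the statement is the Claim_ definition above) =====
theorem findSmallest4_spec : Claim_equal_findSmallest4 := by
  intro L _
  unfold Spec_findSmallest4
  rw [findSmallest4_eq_filter, findSmallest4_alt_eq_filter]
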